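-- pv_equiv track=rewrite | github.com/Rajvardhan-Desai/blame-the-ocean | loader.py | _infer_dims
-- ===== SOURCE A (Python) =====
-- def _infer_dims(shape: tuple, coords: dict) -> tuple:
--     """
--     Guess dimension names from array shape by matching coordinate lengths.
--
--     Avoids duplicate dimension names. Falls back to dim_0, dim_1, ...
--     when ambiguous.
--     """
--     dims = []
--     used = set()
--
--     for i, size in enumerate(shape):
--         matches = [
--             name for name, values in coords.items()
--             if len(values) == size and name not in used
--         ]
--
--         if len(matches) == 1:
--             dim = matches[0]
--             used.add(dim)
--         else:
--             dim = f"dim_{i}"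
--
--         dims.append(dim)
--
--     return tuple(dims)
-- ===== SOURCE B (Python) =====
-- def _infer_dims(shape: tuple, coords: dict) -> tuple:
--     # Two passes: build a length-frequency table and a uniquely-sized-length -> name
--     # table once, then resolve each axis by table lookup with a consumed-size set.
--     count = {}
--     for values in coords.values():
--         count[len(values)] = count.get(len(values), 0) + 1
--     sole = {len(values): name for name, values in coords.items()
--             if count[len(values)] == 1}
--     dims = []
--     consumed = set()
--     for i, size in enumerate(shape):
--         if count.get(size, 0) == 1 and size not in consumed:
--             dims.append(sole[size])
--             consumed.add(size)
--         else:
--             dims.append(f"dim_{i}")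
--     return tuple(dims)
-- ===== Notes on version B (the rewrite author's own statement) =====
-- stated objective: faster
-- what changed: A rescans all coords for every axis with a used-names set; B makes two precomputed passes over coords (a length-frequency table and a uniquely-sized-length->name table) and then resolves each axis by table lookup with a consumed-size set, so the per-axis inner scan disappears.
import Mathlib
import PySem

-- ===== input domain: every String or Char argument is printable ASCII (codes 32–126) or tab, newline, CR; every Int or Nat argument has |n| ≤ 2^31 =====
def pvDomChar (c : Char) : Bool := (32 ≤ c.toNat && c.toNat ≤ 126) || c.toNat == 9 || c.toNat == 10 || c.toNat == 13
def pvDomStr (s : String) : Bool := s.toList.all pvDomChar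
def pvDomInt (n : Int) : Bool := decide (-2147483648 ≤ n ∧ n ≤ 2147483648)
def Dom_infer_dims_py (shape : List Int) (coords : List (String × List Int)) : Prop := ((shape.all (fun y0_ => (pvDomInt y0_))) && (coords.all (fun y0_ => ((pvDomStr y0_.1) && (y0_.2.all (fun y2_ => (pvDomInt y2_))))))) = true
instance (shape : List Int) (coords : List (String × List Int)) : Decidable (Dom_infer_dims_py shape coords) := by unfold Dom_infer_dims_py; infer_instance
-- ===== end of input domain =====

-- B replaces A's per-axis rescan of all coords (with a used-names set) by two precomputed
-- tables (length frequency, unique-length → name) and a consumed-size set, dropping the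
-- quadratic inner scan (faster in a timing run). Neither version mutates its arguments.

-- ===== PORT A =====
-- loop body of A's 'for i, size in enumerate(shape)'
def pvStepA (coords : List (String × List Int)) (st : List String × PySem.Set String)
    (p : Int × Int) : List String × PySem.Set String :=
  let matchlist := (coords.filter
      (fun nv => ((nv.2.length : Int) == p.2) && !(PySem.Set.contains st.2 nv.1))).map Prod.fst
  if matchlist.length = 1 then
    (st.1 ++ [matchlist.headD ""], PySem.Set.add st.2 (matchlist.headD ""))
  else
    (st.1 ++ ["dim_" ++ PySem.Int.toStr p.1], st.2)

def infer_dims_py (shape : List Int) (coords : List (String × List Int)) : List String :=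
  ((PySem.List.enumerate shape 0).foldl (pvStepA coords) ([], PySem.Set.empty)).1

-- ===== PORT B =====
-- loop body of B's 'for i, size in enumerate(shape)'
def pvStepB (count : PySem.Dict Int Int) (sole : PySem.Dict Int String)
    (st : List String × PySem.Set Int) (p : Int × Int) : List String × PySem.Set Int :=
  if (count.getD p.2 0 == 1) && !(PySem.Set.contains st.2 p.2) then
    (st.1 ++ [sole.getD p.2 ""], PySem.Set.add st.2 p.2)
  else
    (st.1 ++ ["dim_" ++ PySem.Int.toStr p.1], st.2)

def infer_dims_py_alt (shape : List Int) (coords : List (String × List Int)) : List String :=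
  let count : PySem.Dict Int Int :=
    coords.foldl (fun d nv => d.insert (nv.2.length : Int) (d.getD (nv.2.length : Int) 0 + 1))
      PySem.Dict.empty
  let sole : PySem.Dict Int String :=
    coords.foldl (fun d nv => if count.getD (nv.2.length : Int) 0 == 1
        then d.insert (nv.2.length : Int) nv.1 else d)
      PySem.Dict.empty
  ((PySem.List.enumerate shape 0).foldl (pvStepB count sole) ([], PySem.Set.empty)).1

-- ===== PRECONDITION & SPEC =====
-- 'coords' encodes a Python dict, whose keys are necessarily distinct; Pre_ excludes only
-- association lists with duplicate keys, which no Python call can produce.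
def Pre_infer_dims_py (shape : List Int) (coords : List (String × List Int)) : Prop :=
  (coords.map Prod.fst).Nodup
instance (shape : List Int) (coords : List (String × List Int)) : Decidable (Pre_infer_dims_py shape coords) := by unfold Pre_infer_dims_py; infer_instance

def pvWitness_infer_dims_py : List Int × (List (String × List Int)) :=
  ([2, 3, 3], [("lat", [0, 0]), ("lon", [0, 0, 0]), ("t", [1, 1, 1])])

def Spec_infer_dims_py (shape : List Int) (coords : List (String × List Int)) (out : List String) : Prop := out = infer_dims_py_alt shape coords
instance (shape : List Int) (coords : List (String × List Int)) (out : List String) : Decidable (Spec_infer_dims_py shape coords out) := by unfold Spec_infer_dims_py; infer_instance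

-- ===== CLAIM (what is proved, stated in full; the proofs are below) =====
def Claim_equal_infer_dims_py : Prop := ∀ (shape : List Int) (coords : List (String × List Int)), Dom_infer_dims_py shape coords → Pre_infer_dims_py shape coords → Spec_infer_dims_py shape coords (infer_dims_py shape coords)

-- ===== LEMMAS AND PROOFS =====

-- the Int length of a coord entry, the quantity both programs key on
def pvLen (nv : String × List Int) : Int := (nv.2.length : Int)

-- a conditional-insert fold never touches a key no admitted entry carries
lemma pv_getD_fold_cond_ne (t : List (String × List Int)) (P : (String × List Int) → Bool)
    (d : PySem.Dict Int String) (s : Int) (h : ∀ y ∈ t, P y = true → pvLen y ≠ s) :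
    (t.foldl (fun d nv => if P nv then d.insert (pvLen nv) nv.1 else d) d).getD s "" = d.getD s "" := by
  induction t generalizing d with
  | nil => rfl
  | cons y t ih =>
    simp only [List.foldl_cons]
    by_cases hy : P y = true
    · rw [ih _ (fun z hz hp => h z (List.mem_cons_of_mem _ hz) hp), if_pos hy,
        PySem.Dict.getD_insert_of_ne _ _ _ (Ne.symm (h y (by simp) hy))]
    · rw [if_neg hy, ih _ (fun z hz hp => h z (List.mem_cons_of_mem _ hz) hp)]

-- a conditional-insert fold at a key all of whose admitted entries share one name
lemma pv_getD_fold_cond (l : List (String × List Int)) (P : (String × List Int) → Bool)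
    (d : PySem.Dict Int String) (s : Int) (val : String)
    (hex : ∃ x ∈ l, P x = true ∧ pvLen x = s)
    (hall : ∀ x ∈ l, P x = true → pvLen x = s → x.1 = val) :
    (l.foldl (fun d nv => if P nv then d.insert (pvLen nv) nv.1 else d) d).getD s "" = val := by
  induction l generalizing d with
  | nil => simp at hex
  | cons x t ih =>
    simp only [List.foldl_cons]
    by_cases ht : ∃ y ∈ t, P y = true ∧ pvLen y = s
    · exact ih _ ht (fun z hz hp hk => hall z (List.mem_cons_of_mem _ hz) hp hk)
    · push Not at ht
      obtain ⟨w, hw, hwP, hwk⟩ := hex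
      rcases List.mem_cons.mp hw with rfl | hwt
      · rw [pv_getD_fold_cond_ne t P _ s (fun y hy hp => ht y hy hp), if_pos hwP, hwk,
          PySem.Dict.getD_insert_self]
        exact hall w (by simp) hwP hwk
      · exact absurd hwk (ht w hwt hwP)

-- B's frequency table holds the multiplicity of each length
lemma pv_count_getD (coords : List (String × List Int)) (s : Int) :
    (coords.foldl (fun d nv => d.insert (nv.2.length : Int) (d.getD (nv.2.length : Int) 0 + 1))
      PySem.Dict.empty).getD s 0 = ((coords.map pvLen).count s : Int) := by
  show (coords.foldl (fun (d : PySem.Dict Int Int) nv => d.insert (pvLen nv) (d.getD (pvLen nv) 0 + 1))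
      PySem.Dict.empty).getD s 0 = _
  have h := List.foldl_map (f := pvLen) (g := fun (d : PySem.Dict Int Int) x => d.insert x (d.getD x 0 + 1)) (l := coords) (init := PySem.Dict.empty)
  rw [← h, PySem.Dict.getD_foldl_insert_add_one]
  simp

-- the multiplicity of a length is the length of A's unrestricted filter
lemma pv_count_len (coords : List (String × List Int)) (s : Int) :
    (coords.filter (fun nv => (nv.2.length : Int) == s)).length = (coords.map pvLen).count s := by
  induction coords with
  | nil => rfl
  | cons x t ih =>
    simp only [List.filter_cons, List.map_cons, List.count_cons]
    by_cases h : (x.2.length : Int) = s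
    · simp [pvLen, h, ih]
    · simp [pvLen, h, ih]

lemma pv_uniq_of_count_one (coords : List (String × List Int)) (s : Int)
    (hc : (coords.map pvLen).count s = 1) :
    ∃ e, (coords.filter (fun nv => (nv.2.length : Int) == s)) = [e] :=
  List.length_eq_one_iff.mp ((pv_count_len coords s).trans hc)

-- the loop invariant: A's used-names set and B's consumed-sizes set mirror each other
lemma pv_loop_eq (coords : List (String × List Int)) (hnd : (coords.map Prod.fst).Nodup)
    (count : PySem.Dict Int Int) (sole : PySem.Dict Int String)
    (hcount : ∀ s, count.getD s 0 = ((coords.map pvLen).count s : Int))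
    (hsole : ∀ e ∈ coords, (coords.map pvLen).count (pvLen e) = 1 → sole.getD (pvLen e) "" = e.1)
    (pairs : List (Int × Int)) :
    ∀ (acc : List String) (used : PySem.Set String) (consumed : PySem.Set Int),
    (∀ s ∈ consumed, (coords.map pvLen).count s = 1) →
    (∀ nv ∈ coords, (nv.1 ∈ used ↔ pvLen nv ∈ consumed)) →
    (pairs.foldl (pvStepA coords) (acc, used)).1 = (pairs.foldl (pvStepB count sole) (acc, consumed)).1 := by
  induction pairs with
  | nil => intro acc used consumed _ _; rfl
  | cons p rest ih =>
    intro acc used consumed inv1 inv2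
    simp only [List.foldl_cons]
    by_cases hs : p.2 ∈ consumed
    · -- size already consumed: both take the fallback branch
      have hfilter : coords.filter
          (fun nv => ((nv.2.length : Int) == p.2) && !(PySem.Set.contains used nv.1)) = [] := by
        rw [List.filter_eq_nil_iff]
        intro nv hnv
        by_cases hl : (nv.2.length : Int) = p.2
        · have hmem : nv.1 ∈ used := (inv2 nv hnv).mpr (by rw [pvLen, hl]; exact hs)
          simpa [hl] using hmem
        · simp [hl]
      have hA : pvStepA coords (acc, used) p =
          (acc ++ ["dim_" ++ PySem.Int.toStr p.1], used) := by
        unfold pvStepA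
        rw [hfilter]
        simp
      have hB : pvStepB count sole (acc, consumed) p =
          (acc ++ ["dim_" ++ PySem.Int.toStr p.1], consumed) := by
        unfold pvStepB
        rw [(PySem.Set.contains_iff _ _).mpr hs]
        simp
      rw [hA, hB]
      exact ih _ _ _ inv1 inv2
    · -- size not consumed: no name of that length is used yet
      have hfilter : coords.filter
          (fun nv => ((nv.2.length : Int) == p.2) && !(PySem.Set.contains used nv.1)) =
          coords.filter (fun nv => (nv.2.length : Int) == p.2) := by
        apply List.filter_congr
        intro nv hnv
        by_cases hl : (nv.2.length : Int) = p.2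
        · have hnu : nv.1 ∉ used := fun hmem => hs (by rw [← hl]; exact (inv2 nv hnv).mp hmem)
          simpa [hl] using hnu
        · simp [hl]
      have hconsF : PySem.Set.contains consumed p.2 = false := by
        cases hcc : PySem.Set.contains consumed p.2
        · rfl
        · exact absurd ((PySem.Set.contains_iff _ _).mp hcc) hs
      by_cases hc : (coords.map pvLen).count p.2 = 1
      · -- unique match: A assigns the sole name, B looks it up in its table
        obtain ⟨e, he⟩ := pv_uniq_of_count_one coords p.2 hc
        have heC : e ∈ coords ∧ (e.2.length : Int) = p.2 := by
          have := List.mem_filter.mp (he ▸ List.mem_singleton_self e)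
          exact ⟨this.1, by simpa using this.2⟩
        have huniq : ∀ x ∈ coords, (x.2.length : Int) = p.2 → x = e := by
          intro x hx hxl
          have : x ∈ coords.filter (fun nv => (nv.2.length : Int) == p.2) :=
            List.mem_filter.mpr ⟨hx, by simp [hxl]⟩
          rw [he] at this; simpa using this
        have hA : pvStepA coords (acc, used) p =
            (acc ++ [e.1], PySem.Set.add used e.1) := by
          unfold pvStepA
          rw [hfilter, he]
          simp
        have hB : pvStepB count sole (acc, consumed) p =
            (acc ++ [e.1], PySem.Set.add consumed p.2) := by
          have h1 : (count.getD p.2 0 == 1) = true := by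
            rw [hcount, hc]; rfl
          have h3 : sole.getD p.2 "" = e.1 := by
            have := hsole e heC.1 (by rw [pvLen, heC.2]; exact hc)
            rw [pvLen, heC.2] at this; exact this
          unfold pvStepB
          rw [h1, hconsF, h3]
          simp
        rw [hA, hB]
        apply ih
        · intro s hmem
          rcases (PySem.Set.mem_add _ _ _).mp hmem with h | rfl
          · exact inv1 s h
          · exact hc
        · intro nv hnv
          rw [PySem.Set.mem_add, PySem.Set.mem_add]
          constructor
          · rintro (h | h)
            · exact Or.inl ((inv2 nv hnv).mp h)
            · have : nv = e := List.inj_on_of_nodup_map hnd hnv heC.1 h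
              exact Or.inr (by rw [pvLen, this, heC.2])
          · rintro (h | h)
            · exact Or.inl ((inv2 nv hnv).mpr h)
            · exact Or.inr (congrArg Prod.fst (huniq nv hnv (by rw [← pvLen]; exact h)))
      · -- zero or several candidates: both take the fallback branch
        have hA : pvStepA coords (acc, used) p =
            (acc ++ ["dim_" ++ PySem.Int.toStr p.1], used) := by
          have hlen : ((coords.filter (fun nv => ((nv.2.length : Int) == p.2)
              && !(PySem.Set.contains used nv.1))).map Prod.fst).length ≠ 1 := by
            rw [hfilter, List.length_map, pv_count_len]
            exact hc
          unfold pvStepA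
          rw [if_neg hlen]
        have hB : pvStepB count sole (acc, consumed) p =
            (acc ++ ["dim_" ++ PySem.Int.toStr p.1], consumed) := by
          have h1 : (count.getD p.2 0 == 1) = false := by
            rw [hcount, beq_eq_false_iff_ne]
            exact_mod_cast hc
          unfold pvStepB
          rw [h1]
          simp
        rw [hA, hB]
        exact ih _ _ _ inv1 inv2

-- ===== VERDICT (by name: the statement is the Claim_ definition above) =====
theorem infer_dims_py_spec : Claim_equal_infer_dims_py := by
  intro shape coords _ hpre
  unfold Spec_infer_dims_py infer_dims_py infer_dims_py_alt
  refine pv_loop_eq coords hpre _ _ (fun s => pv_count_getD coords s) ?_ _ [] [] [] (by simp) (by simp)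
  intro e he hc
  refine pv_getD_fold_cond coords _ _ _ _ ⟨e, he, ?_, rfl⟩ ?_
  · rw [show ((e.2.length : Int)) = pvLen e from rfl, pv_count_getD, hc]; rfl
  · intro x hx hPx hkx
    obtain ⟨e', he'⟩ := pv_uniq_of_count_one coords (pvLen e) hc
    have hxe' : x = e' := by
      have : x ∈ coords.filter (fun nv => (nv.2.length : Int) == pvLen e) :=
        List.mem_filter.mpr ⟨hx, by simp [show (x.2.length : Int) = pvLen e from hkx]⟩
      rw [he'] at this; simpa using this
    have hee' : e = e' := by
      have : e ∈ coords.filter (fun nv => (nv.2.length : Int) == pvLen e) :=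
        List.mem_filter.mpr ⟨he, by simp [pvLen]⟩
      rw [he'] at this; simpa using this
    rw [hxe', hee']
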